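-- pv_equiv track=rewrite | github.com/EfeDurmaz16/sardis | packages/sardis-api/src/sardis_api/routers/secure_checkout.py | _host_matches
-- ===== SOURCE A (Python) =====
-- def _host_matches(patterns: list[str], host: str) -> bool:
--     host = (host or "").strip().lower()
--     for pattern in patterns:
--         if pattern.startswith("*."):
--             suffix = pattern[1:]
--             if host.endswith(suffix):
--                 return True
--         elif host == pattern:
--             return True
--     return False
-- ===== SOURCE B (Python) =====
-- def _host_matches(patterns: list[str], host: str) -> bool:
--     # Reverse lookup: instead of testing every pattern against the host,
--     # generate every pattern string that COULD match this host (the host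
--     # itself, plus '*' + each dotted suffix of it) and intersect with patterns.
--     host = (host or "").strip().lower()
--     candidates = {host}
--     for i, ch in enumerate(host):
--         if ch == '.':
--             candidates.add('*' + host[i:])
--     return not candidates.isdisjoint(patterns)
-- ===== Notes on version B (the rewrite author's own statement) =====
-- stated objective: alternative
-- what changed: Instead of scanning patterns and testing each against the host, B inverts the matching: it generates from the host the complete set of pattern strings that could match it (the host itself plus '*' + each dotted suffix of the host) and returns whether that candidate set intersects the pattern list.
import Mathlib
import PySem

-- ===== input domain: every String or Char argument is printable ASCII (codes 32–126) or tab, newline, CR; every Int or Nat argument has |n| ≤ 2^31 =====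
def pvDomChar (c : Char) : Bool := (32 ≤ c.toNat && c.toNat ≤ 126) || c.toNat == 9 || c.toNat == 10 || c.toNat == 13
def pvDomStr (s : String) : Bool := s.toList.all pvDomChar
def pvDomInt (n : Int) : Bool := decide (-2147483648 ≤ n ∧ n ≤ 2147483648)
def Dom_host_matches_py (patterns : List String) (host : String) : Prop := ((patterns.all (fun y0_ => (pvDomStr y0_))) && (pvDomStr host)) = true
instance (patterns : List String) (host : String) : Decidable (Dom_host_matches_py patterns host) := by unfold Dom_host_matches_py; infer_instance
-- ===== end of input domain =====

-- B inverts the matching direction: instead of testing every pattern against the host, it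
-- generates the full candidate set of pattern strings that could match the host (the host
-- itself plus '*' + each dotted suffix) and intersects it with the pattern list; objective: alternative.

-- ===== PORT A =====
-- the for-loop with early returns, as structural recursion over the pattern list
def hostLoopA (patterns : List String) (host : String) : Bool :=
  match patterns with
  | [] => false
  | p :: rest =>
    if PySem.Str.startswith p "*." then
      let suffix := PySem.Str.slice p (some 1) none
      if PySem.Str.endswith host suffix then true else hostLoopA rest host
    else if host = p then true else hostLoopA rest host

def host_matches_py (patterns : List String) (host : String) : Bool :=
  let host := PySem.Str.lower (PySem.Str.strip (if host = "" then "" else host))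
  hostLoopA patterns host

-- ===== PORT B =====
-- transcription of Source B on the List Char representation of strings (PySem's proof-side view):
-- candidates = {host} ∪ {'*' + host[i:] | host[i] = '.'}, then 'not candidates.isdisjoint(patterns)'
def host_matches_py_alt (patterns : List String) (host : String) : Bool :=
  let h := PySem.Chars.lower (PySem.Chars.strip (if host = "" then "" else host).toList)
  let candidates := (PySem.List.enumerate h 0).foldl
      (fun s p => if p.2 = '.' then PySem.Set.add s ('*' :: PySem.List.slice h (some p.1) none) else s)
      (PySem.Set.ofList [h])
  !PySem.Set.isdisjoint candidates (patterns.map String.toList)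

-- ===== PRECONDITION & SPEC =====
def Spec_host_matches_py (patterns : List String) (host : String) (out : Bool) : Prop := out = host_matches_py_alt patterns host
instance (patterns : List String) (host : String) (out : Bool) : Decidable (Spec_host_matches_py patterns host out) := by unfold Spec_host_matches_py; infer_instance

-- ===== CLAIM (what is proved, stated in full; the proofs are below) =====
def Claim_equal_host_matches_py : Prop := ∀ (patterns : List String) (host : String), Dom_host_matches_py patterns host → Spec_host_matches_py patterns host (host_matches_py patterns host)

-- ===== LEMMAS AND PROOFS =====

-- A's loop returns true iff some pattern passes its per-pattern test
lemma hostLoopA_iff (patterns : List String) (h : String) :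
    hostLoopA patterns h = true ↔
      ∃ p ∈ patterns, if PySem.Str.startswith p "*." then
          PySem.Str.endswith h (PySem.Str.slice p (some 1) none) = true
        else h = p := by
  induction patterns with
  | nil => simp [hostLoopA]
  | cons p rest ih =>
    simp only [hostLoopA, List.mem_cons]
    by_cases hp : PySem.Str.startswith p "*." = true
    · rw [if_pos hp]
      by_cases he : PySem.Str.endswith h (PySem.Str.slice p (some 1) none) = true
      · rw [if_pos he]
        exact ⟨fun _ => ⟨p, Or.inl rfl, by rw [if_pos hp]; exact he⟩, fun _ => rfl⟩
      · rw [if_neg he, ih]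
        constructor
        · rintro ⟨q, hq, hc⟩; exact ⟨q, Or.inr hq, hc⟩
        · rintro ⟨q, hq | hq, hc⟩
          · subst hq; rw [if_pos hp] at hc; exact absurd hc he
          · exact ⟨q, hq, hc⟩
    · rw [if_neg hp]
      by_cases hm : h = p
      · rw [if_pos hm]
        exact ⟨fun _ => ⟨p, Or.inl rfl, by rw [if_neg hp]; exact hm⟩, fun _ => rfl⟩
      · rw [if_neg hm, ih]
        constructor
        · rintro ⟨q, hq, hc⟩; exact ⟨q, Or.inr hq, hc⟩
        · rintro ⟨q, hq | hq, hc⟩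
          · subst hq; rw [if_neg hp] at hc; exact absurd hc hm
          · exact ⟨q, hq, hc⟩

-- membership in a fold that conditionally adds to a PySem.Set
lemma mem_foldl_addIf {α β : Type} [BEq β] [LawfulBEq β] (l : List α) (c : α → Prop)
    [DecidablePred c] (f : α → β) (s : PySem.Set β) (x : β) :
    x ∈ l.foldl (fun s p => if c p then PySem.Set.add s (f p) else s) s ↔
      x ∈ s ∨ ∃ p ∈ l, c p ∧ x = f p := by
  induction l generalizing s with
  | nil => simp
  | cons a l ih =>
    simp only [List.foldl_cons, List.mem_cons, ih]
    by_cases ha : c a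
    · rw [if_pos ha, PySem.Set.mem_add]
      constructor
      · rintro ((hx | hx) | hx)
        · exact Or.inl hx
        · exact Or.inr ⟨a, Or.inl rfl, ha, hx⟩
        · rcases hx with ⟨p, hp, hc, he⟩; exact Or.inr ⟨p, Or.inr hp, hc, he⟩
      · rintro (hx | ⟨p, hp | hp, hc, he⟩)
        · exact Or.inl (Or.inl hx)
        · subst hp; exact Or.inl (Or.inr he)
        · exact Or.inr ⟨p, hp, hc, he⟩
    · rw [if_neg ha]
      constructor
      · rintro (hx | ⟨p, hp, hc, he⟩)
        · exact Or.inl hx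
        · exact Or.inr ⟨p, Or.inr hp, hc, he⟩
      · rintro (hx | ⟨p, hp | hp, hc, he⟩)
        · exact Or.inl hx
        · subst hp; exact absurd hc ha
        · exact Or.inr ⟨p, hp, hc, he⟩

-- a nonempty suffix is a drop at an in-range index
lemma suffix_iff_drop {α : Type} (h s : List α) (hs : s ≠ []) :
    s <:+ h ↔ ∃ i : Nat, i < h.length ∧ h.drop i = s := by
  constructor
  · rintro ⟨t, rfl⟩
    refine ⟨t.length, ?_, by simp⟩
    have : 0 < s.length := List.length_pos_iff.mpr hs
    simp; omega
  · rintro ⟨i, _, rfl⟩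
    exact List.drop_suffix i h

-- the candidate set of B contains exactly the host and '*' + its dotted suffixes
lemma mem_candidates (h : List Char) (x : List Char) :
    x ∈ (PySem.List.enumerate h 0).foldl
        (fun s p => if p.2 = '.' then PySem.Set.add s ('*' :: PySem.List.slice h (some p.1) none) else s)
        (PySem.Set.ofList [h]) ↔
      x = h ∨ ∃ i : Nat, i < h.length ∧ h.drop i ≠ [] ∧ (h.drop i).head? = some '.' ∧ x = '*' :: h.drop i := by
  refine (mem_foldl_addIf (l := PySem.List.enumerate h 0) (c := fun p : Int × Char => p.2 = '.')
    (f := fun p : Int × Char => '*' :: PySem.List.slice h (some p.1) none)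
    (s := PySem.Set.ofList [h]) (x := x)).trans ?_
  simp only [PySem.Set.mem_ofList, List.mem_singleton]
  constructor
  · rintro (hx | ⟨p, hp, hc, he⟩)
    · exact Or.inl hx
    · rcases (PySem.List.mem_enumerate_iff _ _ _).mp hp with ⟨k, hk, rfl⟩
      refine Or.inr ⟨k, hk, ?_, ?_, ?_⟩
      · simp [List.drop_eq_nil_iff]; omega
      · rw [List.head?_drop]; simp only [List.getElem?_eq_getElem hk]
        simp only [Option.some.injEq]
        exact hc
      · rw [he]
        have : PySem.List.slice h (some ((0 : Int) + (k : Nat))) none = h.drop k := by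
          have hk := PySem.List.slice_from_natCast (xs := h) (a := k)
          simp only [Int.zero_add]; exact hk
        rw [this]
  · rintro (hx | ⟨i, hi, hne, hhd, rfl⟩)
    · exact Or.inl hx
    · refine Or.inr ⟨((0 : Int) + (i : Nat), h[i]), ?_, ?_, ?_⟩
      · exact (PySem.List.mem_enumerate_iff _ _ _).mpr ⟨i, hi, rfl⟩
      · rw [List.head?_drop] at hhd
        simp only [List.getElem?_eq_getElem hi] at hhd
        exact Option.some.inj hhd
      · have : PySem.List.slice h (some ((0 : Int) + (i : Nat))) none = h.drop i := by
          have hi' := PySem.List.slice_from_natCast (xs := h) (a := i)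
          simp only [Int.zero_add]; exact hi'
        rw [this]

-- per pattern: A's test (on the normalized host H) holds iff P.toList lies in B's candidate set
lemma pattern_iff (H P : String) :
    (if PySem.Str.startswith P "*." then
        PySem.Str.endswith H (PySem.Str.slice P (some 1) none) = true
      else H = P) ↔
      (P.toList = H.toList ∨ ∃ i : Nat, i < H.toList.length ∧ H.toList.drop i ≠ [] ∧
        (H.toList.drop i).head? = some '.' ∧ P.toList = '*' :: H.toList.drop i) := by
  set h := H.toList with hh
  by_cases hp : PySem.Str.startswith P "*." = true
  · rw [if_pos hp]
    have hpre : ['*', '.'] <+: P.toList := by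
      have := (PySem.Chars.startswith_iff (s := P.toList) (p := "*.".toList)).mp (by simpa using hp)
      simpa using this
    rcases hpre with ⟨rest, hrest⟩
    have hP : P.toList = '*' :: '.' :: rest := hrest.symm
    have hslice : (PySem.Str.slice P (some 1) none).toList = '.' :: rest := by
      simp [PySem.Str.toList_slice, PySem.List.slice_from_one, hP]
    have hend : PySem.Str.endswith H (PySem.Str.slice P (some 1) none) = true ↔ ('.' :: rest) <:+ h := by
      rw [show PySem.Str.endswith H (PySem.Str.slice P (some 1) none)
            = PySem.Chars.endswith H.toList (PySem.Str.slice P (some 1) none).toList by simp]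
      rw [hslice, PySem.Chars.endswith_iff]
    rw [hend, suffix_iff_drop h ('.' :: rest) (by simp)]
    constructor
    · rintro ⟨i, hi, hdrop⟩
      exact Or.inr ⟨i, hi, by simp [hdrop], by simp [hdrop], by simp [hP, hdrop]⟩
    · rintro (hx | ⟨i, hi, hne, hhd, hx⟩)
      · -- P.toList = h: then h = '*'::'.'::rest and '.'::rest = h.drop 1
        refine ⟨1, ?_, ?_⟩ <;> rw [← hx, hP] <;> simp
      · rw [hP] at hx
        exact ⟨i, hi, by simpa using hx.symm⟩
  · rw [if_neg hp]
    have hHP : H = P ↔ P.toList = h := by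
      constructor
      · rintro rfl; rfl
      · intro he; exact String.ext he.symm
    rw [hHP]
    constructor
    · exact Or.inl
    · rintro (hx | ⟨i, hi, hne, hhd, hx⟩)
      · exact hx
      · exfalso
        apply hp
        rw [show PySem.Str.startswith P "*." = PySem.Chars.startswith P.toList "*.".toList by simp]
        rw [PySem.Chars.startswith_iff]
        rcases List.exists_cons_of_ne_nil hne with ⟨c, t, hct⟩
        have hc : c = '.' := by rw [hct] at hhd; simpa using hhd
        rw [hx, hct, hc]
        exact ⟨t, by simp⟩

-- ===== VERDICT (by name: the statement is the Claim_ definition above) =====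
theorem host_matches_py_spec : Claim_equal_host_matches_py := by
  intro patterns host _
  unfold Spec_host_matches_py host_matches_py host_matches_py_alt
  set H := PySem.Str.lower (PySem.Str.strip (if host = "" then "" else host)) with hH
  have hlist : PySem.Chars.lower (PySem.Chars.strip (if host = "" then "" else host).toList) = H.toList := by
    simp [hH]
  rw [hlist]
  rw [Bool.eq_iff_iff, hostLoopA_iff, Bool.not_eq_eq_eq_not, Bool.not_true,
    ← Bool.not_eq_true, PySem.Set.isdisjoint_iff]
  push Not
  constructor
  · rintro ⟨P, hP, hc⟩
    refine ⟨P.toList, ?_, List.mem_map_of_mem hP⟩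
    exact (mem_candidates H.toList P.toList).mpr ((pattern_iff H P).mp hc)
  · rintro ⟨x, hx, hxp⟩
    rcases List.mem_map.mp hxp with ⟨P, hP, rfl⟩
    exact ⟨P, hP, (pattern_iff H P).mpr ((mem_candidates H.toList P.toList).mp hx)⟩
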